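-- pv_equiv track=rewrite | github.com/oigomezz/Retos | Hackerearth/Algorithms/Graphs/Breadth-First-Search/The-Witches-of-HEgwarts/solution.py | fn
-- ===== SOURCE A (Python) =====
-- def fn(x, dp):
--     if x <= 1:
--         return 0
--     if x in dp:
--         return dp[x]
--     opt1 = 1 + (x % 2) + fn(x // 2, dp)
--     opt2 = 1 + (x % 3) + fn(x // 3, dp)
--     dp[x] = min(opt1, opt2)
--     return dp[x]
-- ===== SOURCE B (Python) =====
-- def fn(x, dp):
--     if x <= 1:
--         return 0
--     if x in dp:
--         return dp[x]
--     states = set()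
--     _collect(x, dp, states)
--     memo = {}
--     for y in sorted(states):
--         memo[y] = min(1 + y % 2 + _cost(y // 2, dp, memo),
--                       1 + y % 3 + _cost(y // 3, dp, memo))
--     dp.update(memo)
--     return memo[x]
--
-- def _collect(y, dp, states):
--     if y <= 1 or y in dp or y in states:
--         return
--     states.add(y)
--     _collect(y // 2, dp, states)
--     _collect(y // 3, dp, states)
--
-- def _cost(y, dp, memo):
--     if y <= 1:
--         return 0
--     if y in dp:
--         return dp[y]
--     return memo[y]
-- ===== Notes on version B (the rewrite author's own statement) =====
-- stated objective: alternative
-- what changed: Replaces the memoized top-down recursion that threads the shared dict through the call tree with a three-phase DP: collect the set of reachable unsolved states, sort it ascending, and fill a fresh memo bottom-up with a single loop.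
import Mathlib
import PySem

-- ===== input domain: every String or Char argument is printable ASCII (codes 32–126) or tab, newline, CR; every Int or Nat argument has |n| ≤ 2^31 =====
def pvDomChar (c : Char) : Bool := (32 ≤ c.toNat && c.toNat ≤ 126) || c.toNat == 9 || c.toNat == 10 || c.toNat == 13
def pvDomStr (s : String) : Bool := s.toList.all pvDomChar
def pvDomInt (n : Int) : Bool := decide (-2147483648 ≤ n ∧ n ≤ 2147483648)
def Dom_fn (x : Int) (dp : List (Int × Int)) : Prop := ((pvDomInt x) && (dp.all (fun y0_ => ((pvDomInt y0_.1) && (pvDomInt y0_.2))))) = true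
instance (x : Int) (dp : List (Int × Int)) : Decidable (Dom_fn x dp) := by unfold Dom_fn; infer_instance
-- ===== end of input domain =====

-- B replaces A's memoized recursion (which threads the shared dict) by collect-states / sort / bottom-up fold;
-- the equivalence proved is about the RETURN value: both Pythons also mutate dp, adding the same key/value set (in a different order).
-- Recursions are ported with a Nat fuel (x.toNat + 1 steps always suffice: the argument strictly decreases and stays positive).

-- ===== PORT A =====
-- A recursively computes fn(x//2, dp), fn(x//3, dp), mutating dp; the port threads the dict as state, returning (value, dict).
def fnAux : Nat → Int → PySem.Dict Int Int → Int × PySem.Dict Int Int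
  | 0, _, d => (0, d)   -- fuel guard only; never reached with the fuel fn supplies
  | fuel + 1, x, d =>
    if x ≤ 1 then (0, d)
    else
      match d.get? x with
      | some v => (v, d)
      | none =>
        let r1 := fnAux fuel (PySem.Int.floordiv x 2) d
        let opt1 := 1 + PySem.Int.mod x 2 + r1.1
        let r2 := fnAux fuel (PySem.Int.floordiv x 3) r1.2
        let opt2 := 1 + PySem.Int.mod x 3 + r2.1
        let v := min opt1 opt2
        (v, r2.2.insert x v)

def fn (x : Int) (dp : List (Int × Int)) : Int := (fnAux (x.toNat + 1) x (PySem.Dict.mk dp)).1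

-- ===== PORT B =====
-- port of _collect: depth-first collection of the reachable states y > 1 not already in dp
def collectB : Nat → Int → PySem.Dict Int Int → PySem.Set Int → PySem.Set Int
  | 0, _, _, states => states   -- fuel guard only; never reached with the fuel fn_alt supplies
  | fuel + 1, y, d, states =>
    if y ≤ 1 ∨ d.contains y ∨ PySem.Set.contains states y then states
    else
      collectB fuel (PySem.Int.floordiv y 3) d
        (collectB fuel (PySem.Int.floordiv y 2) d (PySem.Set.add states y))

-- port of _cost; 'memo[y]' would be a KeyError when y is absent — unreachable on the calls B makes
-- (every looked-up state is already filled by the sorted bottom-up order), ported as getD 0.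
def costB (y : Int) (d : PySem.Dict Int Int) (memo : PySem.Dict Int Int) : Int :=
  if y ≤ 1 then 0
  else
    match d.get? y with
    | some v => v
    | none => (memo.get? y).getD 0

-- port of B's 'for y in sorted(states)' loop filling memo
def fillB (d : PySem.Dict Int Int) (l : List Int) (m : PySem.Dict Int Int) : PySem.Dict Int Int :=
  l.foldl (fun m y => m.insert y
    (min (1 + PySem.Int.mod y 2 + costB (PySem.Int.floordiv y 2) d m)
         (1 + PySem.Int.mod y 3 + costB (PySem.Int.floordiv y 3) d m))) m

def fn_alt (x : Int) (dp : List (Int × Int)) : Int :=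
  if x ≤ 1 then 0
  else
    match (PySem.Dict.mk dp).get? x with
    | some v => v
    | none =>
      ((fillB (PySem.Dict.mk dp)
          (PySem.List.sorted (collectB (x.toNat + 1) x (PySem.Dict.mk dp) PySem.Set.empty) (fun y => y) false)
          PySem.Dict.empty).get? x).getD 0   -- memo[x]: x is always present here (x > 1, x not in dp)

-- ===== PRECONDITION & SPEC =====
def Spec_fn (x : Int) (dp : List (Int × Int)) (out : Int) : Prop := out = fn_alt x dp
instance (x : Int) (dp : List (Int × Int)) (out : Int) : Decidable (Spec_fn x dp out) := by unfold Spec_fn; infer_instance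

-- ===== CLAIM (what is proved, stated in full; the proofs are below) =====
def Claim_equal_fn : Prop := ∀ (x : Int) (dp : List (Int × Int)), Dom_fn x dp → Spec_fn x dp (fn x dp)

-- ===== LEMMAS AND PROOFS =====

-- the common pure value: the recurrence relative to the ORIGINAL dict d (no threading)
def gfn (d : PySem.Dict Int Int) (x : Int) : Int :=
  if x ≤ 1 then 0
  else
    match d.get? x with
    | some v => v
    | none =>
      min (1 + PySem.Int.mod x 2 + gfn d (PySem.Int.floordiv x 2))
          (1 + PySem.Int.mod x 3 + gfn d (PySem.Int.floordiv x 3))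
termination_by x.toNat
decreasing_by
  · rw [PySem.Int.floordiv_eq_ediv_of_pos (by omega : (0:Int) < 2)]; omega
  · rw [PySem.Int.floordiv_eq_ediv_of_pos (by omega : (0:Int) < 3)]; omega

theorem floordiv2_toNat_lt {x : Int} {fuel : Nat} (h1 : ¬ x ≤ 1) (h2 : x.toNat < fuel + 1) :
    (PySem.Int.floordiv x 2).toNat < fuel := by
  rw [PySem.Int.floordiv_eq_ediv_of_pos (by omega : (0:Int) < 2)]; omega
theorem floordiv3_toNat_lt {x : Int} {fuel : Nat} (h1 : ¬ x ≤ 1) (h2 : x.toNat < fuel + 1) :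
    (PySem.Int.floordiv x 3).toNat < fuel := by
  rw [PySem.Int.floordiv_eq_ediv_of_pos (by omega : (0:Int) < 3)]; omega

-- a threaded dict is "good": it extends d0, and every bound key k > 1 is bound to gfn d0 k
def Good (d0 d : PySem.Dict Int Int) : Prop :=
  (∀ k v, d0.get? k = some v → d.get? k = some v) ∧
  (∀ k v, d.get? k = some v → 1 < k → v = gfn d0 k)

theorem good_refl (d0 : PySem.Dict Int Int) : Good d0 d0 := by
  constructor
  · intro k v h; exact h
  · intro k v h hk
    rw [gfn]
    simp [show ¬ k ≤ 1 by omega, h]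

theorem fnAux_good (d0 : PySem.Dict Int Int) (fuel : Nat) :
    ∀ (x : Int) (d : PySem.Dict Int Int), x.toNat < fuel → Good d0 d →
      (fnAux fuel x d).1 = gfn d0 x ∧ Good d0 (fnAux fuel x d).2 := by
  induction fuel with
  | zero => intro x d hx; omega
  | succ fuel ih =>
    intro x d hx hg
    by_cases hle : x ≤ 1
    · rw [gfn]
      simp only [fnAux, if_pos hle]
      exact ⟨by simp, hg⟩
    · cases hv : d.get? x with
      | some v =>
        simp only [fnAux, if_neg hle, hv]
        exact ⟨hg.2 x v hv (by omega), hg⟩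
      | none =>
        obtain ⟨ih1v, ih1g⟩ := ih (PySem.Int.floordiv x 2) d (floordiv2_toNat_lt hle hx) hg
        obtain ⟨ih2v, ih2g⟩ := ih (PySem.Int.floordiv x 3) (fnAux fuel (PySem.Int.floordiv x 2) d).2
          (floordiv3_toNat_lt hle hx) ih1g
        simp only [fnAux, if_neg hle, hv]
        have hd0x : d0.get? x = none := by
          cases h0 : d0.get? x with
          | none => rfl
          | some w => rw [hg.1 x w h0] at hv; cases hv
        have hx' : gfn d0 x = min (1 + PySem.Int.mod x 2 + gfn d0 (PySem.Int.floordiv x 2))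
            (1 + PySem.Int.mod x 3 + gfn d0 (PySem.Int.floordiv x 3)) := by
          rw [gfn]; simp [hle, hd0x]
        constructor
        · rw [hx', ih1v, ih2v]
        · constructor
          · intro k w hk
            have hne : k ≠ x := by
              intro he; subst he
              rw [hd0x] at hk; cases hk
            rw [PySem.Dict.get?_insert, if_neg hne]
            exact ih2g.1 k w hk
          · intro k w hk hk1
            rw [PySem.Dict.get?_insert] at hk
            by_cases he : k = x
            · subst he
              rw [if_pos rfl] at hk
              rw [← Option.some_inj.mp hk, hx', ih1v, ih2v]
            · rw [if_neg he] at hk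
              exact ih2g.2 k w hk hk1

theorem fn_eq_gfn (x : Int) (dp : List (Int × Int)) : fn x dp = gfn (PySem.Dict.mk dp) x := by
  unfold fn
  exact (fnAux_good (PySem.Dict.mk dp) (x.toNat + 1) x (PySem.Dict.mk dp) (by omega) (good_refl _)).1

-- ---- B side ----

theorem collectB_subset (d : PySem.Dict Int Int) (fuel : Nat) :
    ∀ (y : Int) (states : PySem.Set Int), ∀ z ∈ states, z ∈ collectB fuel y d states := by
  induction fuel with
  | zero => intro y states z hz; simpa only [collectB] using hz
  | succ fuel ih =>
    intro y states z hz
    by_cases h : y ≤ 1 ∨ d.contains y ∨ PySem.Set.contains states y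
    · simp only [collectB, if_pos h]; exact hz
    · simp only [collectB, if_neg h]
      exact ih _ _ z (ih _ _ z ((PySem.Set.mem_add _ _ _).mpr (Or.inl hz)))

theorem collectB_handled (d : PySem.Dict Int Int) (fuel : Nat) (y : Int) (states : PySem.Set Int)
    (hf : y.toNat < fuel) :
    y ≤ 1 ∨ (d.get? y).isSome ∨ y ∈ collectB fuel y d states := by
  obtain ⟨f, rfl⟩ : ∃ f, fuel = f + 1 := ⟨fuel - 1, by omega⟩
  by_cases h : y ≤ 1 ∨ d.contains y ∨ PySem.Set.contains states y
  · rcases h with h | h | h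
    · exact Or.inl h
    · exact Or.inr (Or.inl (by rwa [PySem.Dict.contains_eq_isSome_get?] at h))
    · refine Or.inr (Or.inr ?_)
      simp only [collectB, if_pos (by tauto : y ≤ 1 ∨ d.contains y ∨ PySem.Set.contains states y)]
      exact (PySem.Set.contains_iff _ _).mp h
  · refine Or.inr (Or.inr ?_)
    simp only [collectB, if_neg h]
    have : y ∈ PySem.Set.add states y := (PySem.Set.mem_add _ _ _).mpr (Or.inr rfl)
    exact collectB_subset d f _ _ y (collectB_subset d f _ _ y this)

theorem collectB_inv (d : PySem.Dict Int Int) (fuel : Nat) :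
    ∀ (y : Int) (states : PySem.Set Int),
    (∀ z ∈ states, 1 < z ∧ d.get? z = none) →
    ∀ z ∈ collectB fuel y d states, 1 < z ∧ d.get? z = none := by
  induction fuel with
  | zero => intro y states h0 z hz; exact h0 z (by simpa only [collectB] using hz)
  | succ fuel ih =>
    intro y states h0
    by_cases h : y ≤ 1 ∨ d.contains y ∨ PySem.Set.contains states y
    · simp only [collectB, if_pos h]; exact h0
    · simp only [collectB, if_neg h]
      push Not at h
      obtain ⟨h1, h2, _⟩ := h
      refine ih _ _ (ih _ _ ?_)
      intro z hz
      rcases (PySem.Set.mem_add _ _ _).mp hz with hz | hz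
      · exact h0 z hz
      · subst hz
        refine ⟨by omega, ?_⟩
        cases hg : d.get? z with
        | none => rfl
        | some w =>
          rw [PySem.Dict.contains_eq_isSome_get?, hg] at h2; simp at h2

def childOK (d : PySem.Dict Int Int) (c : Int) (s : PySem.Set Int) : Prop :=
  c ≤ 1 ∨ (d.get? c).isSome ∨ c ∈ s

theorem childOK_mono {d : PySem.Dict Int Int} {c : Int} {s t : PySem.Set Int}
    (hsub : ∀ z ∈ s, z ∈ t) (h : childOK d c s) : childOK d c t := by
  rcases h with h | h | h
  · exact Or.inl h
  · exact Or.inr (Or.inl h)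
  · exact Or.inr (Or.inr (hsub c h))

theorem collectB_closed (d : PySem.Dict Int Int) (fuel : Nat) :
    ∀ (y : Int) (states : PySem.Set Int), y.toNat < fuel →
    ∀ z ∈ collectB fuel y d states, z ∉ states →
      childOK d (PySem.Int.floordiv z 2) (collectB fuel y d states) ∧
      childOK d (PySem.Int.floordiv z 3) (collectB fuel y d states) := by
  induction fuel with
  | zero => intro y states hf; omega
  | succ fuel ih =>
    intro y states hf z hz hz'
    by_cases h : y ≤ 1 ∨ d.contains y ∨ PySem.Set.contains states y
    · rw [collectB, if_pos h] at hz
      exact absurd hz hz'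
    · have hy1 : ¬ y ≤ 1 := fun hc => h (Or.inl hc)
      rw [collectB, if_neg h] at hz ⊢
      have hsub23 := collectB_subset d fuel (PySem.Int.floordiv y 3)
        (collectB fuel (PySem.Int.floordiv y 2) d (states.add y))
      by_cases hz2 : z ∈ collectB fuel (PySem.Int.floordiv y 2) d (states.add y)
      · by_cases hz1 : z ∈ PySem.Set.add states y
        · have hy : z = y := by
            rcases (PySem.Set.mem_add _ _ _).mp hz1 with h' | h'
            · exact absurd h' hz'
            · exact h'
          subst hy
          constructor
          · refine childOK_mono hsub23 ?_
            exact collectB_handled d fuel (PySem.Int.floordiv z 2) (states.add z)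
              (floordiv2_toNat_lt hy1 hf)
          · exact collectB_handled d fuel (PySem.Int.floordiv z 3) _
              (floordiv3_toNat_lt hy1 hf)
        · have := ih (PySem.Int.floordiv y 2) (states.add y) (floordiv2_toNat_lt hy1 hf) z hz2 hz1
          exact ⟨childOK_mono hsub23 this.1, childOK_mono hsub23 this.2⟩
      · exact ih (PySem.Int.floordiv y 3) _ (floordiv3_toNat_lt hy1 hf) z hz hz2

theorem collectB_nodup (d : PySem.Dict Int Int) (fuel : Nat) :
    ∀ (y : Int) (states : PySem.Set Int), states.Nodup → (collectB fuel y d states).Nodup := by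
  induction fuel with
  | zero => intro y states h0; simpa only [collectB] using h0
  | succ fuel ih =>
    intro y states h0
    by_cases h : y ≤ 1 ∨ d.contains y ∨ PySem.Set.contains states y
    · simp only [collectB, if_pos h]; exact h0
    · simp only [collectB, if_neg h]
      exact ih _ _ (ih _ _ (PySem.Set.nodup_add _ _ h0))

theorem floordiv2_lt {y : Int} (h : 1 < y) : PySem.Int.floordiv y 2 < y := by
  rw [PySem.Int.floordiv_eq_ediv_of_pos (by omega : (0:Int) < 2)]; omega
theorem floordiv3_lt {y : Int} (h : 1 < y) : PySem.Int.floordiv y 3 < y := by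
  rw [PySem.Int.floordiv_eq_ediv_of_pos (by omega : (0:Int) < 3)]; omega

theorem fillB_cons (d : PySem.Dict Int Int) (y : Int) (t : List Int) (m : PySem.Dict Int Int) :
    fillB d (y :: t) m = fillB d t (m.insert y
      (min (1 + PySem.Int.mod y 2 + costB (PySem.Int.floordiv y 2) d m)
           (1 + PySem.Int.mod y 3 + costB (PySem.Int.floordiv y 3) d m))) := rfl

-- the bottom-up fill: processing a strictly increasing list of states keeps memo = gfn on its keys
theorem fill_spec (d : PySem.Dict Int Int) (S : PySem.Set Int)
    (hinv : ∀ z ∈ S, 1 < z ∧ d.get? z = none)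
    (hcl : ∀ z ∈ S, childOK d (PySem.Int.floordiv z 2) S ∧ childOK d (PySem.Int.floordiv z 3) S) :
    ∀ (l : List Int) (m : PySem.Dict Int Int),
      l.Pairwise (· < ·) → (∀ z ∈ l, z ∈ S) →
      (∀ k v, m.get? k = some v → v = gfn d k) →
      (∀ z ∈ S, (m.get? z).isSome ∨ z ∈ l) →
      (∀ k v, (fillB d l m).get? k = some v → v = gfn d k) ∧
      (∀ z ∈ S, ((fillB d l m).get? z).isSome) := by
  intro l
  induction l with
  | nil =>
    intro m _ _ hcorr hcov
    refine ⟨hcorr, ?_⟩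
    intro z hz
    rcases hcov z hz with h | h
    · exact h
    · cases h
  | cons y t ih =>
    intro m hp hsub hcorr hcov
    have hp' := List.pairwise_cons.mp hp
    have hyS : y ∈ S := hsub y (by simp)
    obtain ⟨hy1, hyd⟩ := hinv y hyS
    have hcost : ∀ c : Int, c < y → childOK d c S → costB c d m = gfn d c := by
      intro c hcy hok
      unfold costB
      by_cases hc1 : c ≤ 1
      · rw [if_pos hc1, gfn]; simp [hc1]
      · rw [if_neg hc1]
        cases hcd : d.get? c with
        | some w => rw [gfn]; simp [hc1, hcd]
        | none =>
          simp only
          have hcS : c ∈ S := by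
            rcases hok with h | h | h
            · omega
            · rw [hcd] at h; simp at h
            · exact h
          rcases hcov c hcS with hm | hl
          · cases hmc : m.get? c with
            | none => rw [hmc] at hm; simp at hm
            | some w =>
              simp only [Option.getD_some]
              exact hcorr c w hmc
          · rcases List.mem_cons.mp hl with he | ht
            · omega
            · have := hp'.1 c ht
              omega
    have h2 : costB (PySem.Int.floordiv y 2) d m = gfn d (PySem.Int.floordiv y 2) :=
      hcost _ (floordiv2_lt hy1) (hcl y hyS).1
    have h3 : costB (PySem.Int.floordiv y 3) d m = gfn d (PySem.Int.floordiv y 3) :=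
      hcost _ (floordiv3_lt hy1) (hcl y hyS).2
    have hval : min (1 + PySem.Int.mod y 2 + costB (PySem.Int.floordiv y 2) d m)
        (1 + PySem.Int.mod y 3 + costB (PySem.Int.floordiv y 3) d m) = gfn d y := by
      rw [h2, h3]
      conv_rhs => rw [gfn]
      simp [show ¬ y ≤ 1 by omega, hyd]
    rw [fillB_cons]
    refine ih _ hp'.2 (fun z hz => hsub z (by simp [hz])) ?_ ?_
    · intro k v hk
      rw [PySem.Dict.get?_insert] at hk
      by_cases he : k = y
      · subst he; rw [if_pos rfl] at hk
        rw [← Option.some_inj.mp hk, hval]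
      · rw [if_neg he] at hk
        exact hcorr k v hk
    · intro z hz
      rcases hcov z hz with hm | hl
      · left
        rw [PySem.Dict.get?_insert]
        split
        · simp
        · exact hm
      · rcases List.mem_cons.mp hl with he | ht
        · left; subst he; rw [PySem.Dict.get?_insert_self]; simp
        · right; exact ht

theorem fn_alt_eq_gfn (x : Int) (dp : List (Int × Int)) : fn_alt x dp = gfn (PySem.Dict.mk dp) x := by
  unfold fn_alt
  by_cases hx : x ≤ 1
  · rw [if_pos hx, gfn]; simp [hx]
  · rw [if_neg hx]
    cases hv : (PySem.Dict.mk dp).get? x with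
    | some v =>
      simp only
      rw [gfn]; simp [hx, hv]
    | none =>
      simp only
      have hinv : ∀ z ∈ collectB (x.toNat + 1) x (PySem.Dict.mk dp) PySem.Set.empty,
          1 < z ∧ (PySem.Dict.mk dp).get? z = none :=
        collectB_inv _ _ x PySem.Set.empty (by intro z hz; cases hz)
      have hcl : ∀ z ∈ collectB (x.toNat + 1) x (PySem.Dict.mk dp) PySem.Set.empty,
          childOK (PySem.Dict.mk dp) (PySem.Int.floordiv z 2) (collectB (x.toNat + 1) x (PySem.Dict.mk dp) PySem.Set.empty) ∧
          childOK (PySem.Dict.mk dp) (PySem.Int.floordiv z 3) (collectB (x.toNat + 1) x (PySem.Dict.mk dp) PySem.Set.empty) := by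
        intro z hz
        exact collectB_closed _ _ x PySem.Set.empty (by omega) z hz (by intro h; cases h)
      have hxS : x ∈ collectB (x.toNat + 1) x (PySem.Dict.mk dp) PySem.Set.empty := by
        rcases collectB_handled (PySem.Dict.mk dp) (x.toNat + 1) x PySem.Set.empty (by omega) with h | h | h
        · omega
        · rw [hv] at h; simp at h
        · exact h
      have hnd : (collectB (x.toNat + 1) x (PySem.Dict.mk dp) PySem.Set.empty).Nodup :=
        collectB_nodup _ _ x PySem.Set.empty List.nodup_nil
      have hperm : (PySem.List.sorted (collectB (x.toNat + 1) x (PySem.Dict.mk dp) PySem.Set.empty) (fun y => y) false).Perm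
          (collectB (x.toNat + 1) x (PySem.Dict.mk dp) PySem.Set.empty) :=
        PySem.List.sorted_perm _ (fun y => y) false
      have hndl := hperm.nodup_iff.mpr hnd
      have hple := PySem.List.sorted_pairwise (collectB (x.toNat + 1) x (PySem.Dict.mk dp) PySem.Set.empty) (fun y => y)
      have hp : (PySem.List.sorted (collectB (x.toNat + 1) x (PySem.Dict.mk dp) PySem.Set.empty) (fun y => y) false).Pairwise (· < ·) := by
        have := hple.and hndl
        exact this.imp (fun h => by
          rcases h with ⟨h1, h2⟩
          omega)
      obtain ⟨hcorr, hcov⟩ := fill_spec (PySem.Dict.mk dp) _ hinv hcl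
        (PySem.List.sorted (collectB (x.toNat + 1) x (PySem.Dict.mk dp) PySem.Set.empty) (fun y => y) false)
        PySem.Dict.empty hp
        (fun z hz => hperm.mem_iff.mp hz)
        (by intro k v h; rw [PySem.Dict.get?_empty] at h; cases h)
        (by intro z hz; right; exact hperm.mem_iff.mpr hz)
      cases hm : ((fillB (PySem.Dict.mk dp)
          (PySem.List.sorted (collectB (x.toNat + 1) x (PySem.Dict.mk dp) PySem.Set.empty) (fun y => y) false)
          PySem.Dict.empty).get? x) with
      | none =>
        have := hcov x hxS
        rw [hm] at this; simp at this
      | some w =>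
        simp only [Option.getD_some]
        exact hcorr x w hm

-- ===== VERDICT (by name: the statement is the Claim_ definition above) =====
theorem fn_spec : Claim_equal_fn := by
  intro x dp _
  unfold Spec_fn
  rw [fn_eq_gfn, fn_alt_eq_gfn]
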